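-- pv_equiv track=rewrite | github.com/nishikabajaj/smart-pantry-sorter | recipe.py | _spoonacular_diet_param
-- ===== SOURCE A (Python) =====
-- def _spoonacular_diet_param(flags: list[str]) -> str | None:
--     """
--     Maps our DietFlags values to Spoonacular's accepted diet strings.
--     Spoonacular accepts a single diet param; we pick the most restrictive match.
--     https://spoonacular.com/food-api/docs#Diets
--     """
--     PRIORITY = [
--         "vegan", "vegetarian", "gluten free", "ketogenic",
--         "lacto-vegetarian", "ovo-vegetarian", "paleo",
--         "primal", "low fodmap", "whole30",
--     ]
--     lower_flags = {f.lower() for f in flags}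
--     for diet in PRIORITY:
--         if diet in lower_flags:
--             return diet
--     return None
-- ===== SOURCE B (Python) =====
-- def _spoonacular_diet_param(flags: list[str]) -> str | None:
--     """
--     Same result as A, by the inverse traversal: loop over the flags,
--     tracking the minimum priority rank, instead of scanning PRIORITY
--     for the first hit in a lowercased set.
--     """
--     PRIORITY = [
--         "vegan", "vegetarian", "gluten free", "ketogenic",
--         "lacto-vegetarian", "ovo-vegetarian", "paleo",
--         "primal", "low fodmap", "whole30",
--     ]
--     best = None
--     for f in flags:
--         d = f.lower()
--         r = PRIORITY.index(d) if d in PRIORITY else None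
--         if r is not None and (best is None or r < best):
--             best = r
--     return PRIORITY[best] if best is not None else None
-- ===== Notes on version B (the rewrite author's own statement) =====
-- stated objective: alternative
-- what changed: B inverts the traversal: instead of building a lowercased set of the flags and scanning PRIORITY for the first membership hit, it loops once over the flags, looks up each lowercased flag's rank in PRIORITY, and keeps the minimum rank, returning PRIORITY[min] (None if nothing matched).
import Mathlib
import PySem

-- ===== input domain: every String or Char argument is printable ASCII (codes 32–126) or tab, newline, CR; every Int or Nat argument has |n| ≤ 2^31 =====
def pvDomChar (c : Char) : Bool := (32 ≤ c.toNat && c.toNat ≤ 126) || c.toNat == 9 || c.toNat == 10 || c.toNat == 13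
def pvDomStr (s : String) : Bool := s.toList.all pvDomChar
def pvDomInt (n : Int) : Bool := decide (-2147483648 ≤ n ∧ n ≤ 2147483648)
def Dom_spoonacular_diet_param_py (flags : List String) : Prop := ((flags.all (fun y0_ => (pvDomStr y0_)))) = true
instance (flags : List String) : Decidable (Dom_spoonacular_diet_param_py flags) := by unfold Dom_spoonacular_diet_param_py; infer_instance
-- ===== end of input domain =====

-- B replaces A's scan of PRIORITY (first hit in a lowercased set of the flags) by a single
-- pass over the flags that tracks the minimum priority rank; same result, alternative traversal.

-- The PRIORITY constant shared (as Python source text) by both programs.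
def pvPRIORITY : List String :=
  ["vegan", "vegetarian", "gluten free", "ketogenic",
   "lacto-vegetarian", "ovo-vegetarian", "paleo",
   "primal", "low fodmap", "whole30"]

-- ===== PORT A =====
def spoonacular_diet_param_py (flags : List String) : Option String :=
  let lower_flags : PySem.Set String := PySem.Set.ofList (flags.map (fun f => PySem.Str.lower f))
  -- 'for diet in PRIORITY: if diet in lower_flags: return diet' / 'return None'
  pvPRIORITY.find? (fun diet => PySem.Set.contains lower_flags diet)

-- ===== PORT B =====
-- one loop iteration of Source B: rank of the lowercased flag, kept if smaller than the best so far
def pvStep (best : Option Nat) (f : String) : Option Nat :=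
  match PySem.List.index? pvPRIORITY (PySem.Str.lower f) with
  | some r => match best with
    | none => some r
    | some b => if r < b then some r else some b
  | none => best

def spoonacular_diet_param_py_alt (flags : List String) : Option String :=
  match flags.foldl pvStep none with
  | some b => PySem.List.pyGet? pvPRIORITY (b : Int)   -- PRIORITY[best]
  | none => none

-- ===== PRECONDITION & SPEC =====
def Spec_spoonacular_diet_param_py (flags : List String) (out : Option String) : Prop := out = spoonacular_diet_param_py_alt flags
instance (flags : List String) (out : Option String) : Decidable (Spec_spoonacular_diet_param_py flags out) := by unfold Spec_spoonacular_diet_param_py; infer_instance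

-- ===== CLAIM (what is proved, stated in full; the proofs are below) =====
def Claim_equal_spoonacular_diet_param_py : Prop := ∀ (flags : List String), Dom_spoonacular_diet_param_py flags → Spec_spoonacular_diet_param_py flags (spoonacular_diet_param_py flags)

-- ===== LEMMAS AND PROOFS =====

-- option-minimum on ranks (none = no match yet)
def pvOmin (a b : Option Nat) : Option Nat :=
  match a, b with
  | none, b => b
  | some x, none => some x
  | some x, some y => some (if y < x then y else x)

theorem pvStep_eq_omin (best : Option Nat) (f : String) :
    pvStep best f = pvOmin best (PySem.List.index? pvPRIORITY (PySem.Str.lower f)) := by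
  cases h : PySem.List.index? pvPRIORITY (PySem.Str.lower f) <;> cases best <;>
    simp only [pvStep, pvOmin, h] <;> split <;> rfl

theorem pvIfMin (x y : Nat) : (if y < x then y else x) = min x y := by
  split <;> omega

theorem pvOmin_assoc (a b c : Option Nat) : pvOmin (pvOmin a b) c = pvOmin a (pvOmin b c) := by
  cases a <;> cases b <;> cases c <;>
    first
    | rfl
    | (simp only [pvOmin, pvIfMin]; rw [Nat.min_assoc])

theorem pvOmin_zero_left (b : Option Nat) : pvOmin (some 0) b = some 0 := by
  cases b <;> simp [pvOmin]

theorem pvOmin_zero_right (a : Option Nat) : pvOmin a (some 0) = some 0 := by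
  cases a <;> simp [pvOmin, pvIfMin]

theorem pvOmin_map_succ (a b : Option Nat) :
    pvOmin (a.map (· + 1)) (b.map (· + 1)) = (pvOmin a b).map (· + 1) := by
  cases a <;> cases b <;> simp only [Option.map_some, Option.map_none, pvOmin] <;>
    first
    | rfl
    | (congr 1; split <;> split <;> omega)

-- pull the accumulator out of the fold
theorem pvFoldl_step (flags : List String) (acc : Option Nat) :
    flags.foldl pvStep acc = pvOmin acc (flags.foldl pvStep none) := by
  induction flags generalizing acc with
  | nil => cases acc <;> simp [pvOmin]
  | cons f fl ih =>
    simp only [List.foldl_cons, pvStep_eq_omin]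
    rw [ih, ih (pvOmin none _), pvOmin_assoc]
    rfl

-- findIdx? of a disjunction is the minimum of the two findIdx?s
theorem pvFindIdx?_or (P : List String) (p q : String → Bool) :
    P.findIdx? (fun a => p a || q a) = pvOmin (P.findIdx? p) (P.findIdx? q) := by
  induction P with
  | nil => rfl
  | cons x xs ih =>
    by_cases hp : p x = true
    · simp [List.findIdx?_cons, hp, pvOmin_zero_left]
    · by_cases hq : q x = true
      · simp [List.findIdx?_cons, hp, hq, pvOmin_zero_right]
      · simp [List.findIdx?_cons, hp, hq, ih, pvOmin_map_succ]

-- B's fold computes the index of the first PRIORITY entry among the lowercased flags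
theorem pvFold_eq_findIdx? (flags : List String) :
    flags.foldl pvStep none =
      pvPRIORITY.findIdx? (fun d => (flags.map (fun f => PySem.Str.lower f)).contains d) := by
  induction flags with
  | nil =>
    symm
    simp [List.findIdx?_eq_none_iff]
  | cons f fl ih =>
    rw [List.foldl_cons, pvFoldl_step, ih, pvStep_eq_omin]
    have h0 : pvOmin none (PySem.List.index? pvPRIORITY (PySem.Str.lower f)) =
        PySem.List.index? pvPRIORITY (PySem.Str.lower f) := rfl
    have h1 : PySem.List.index? pvPRIORITY (PySem.Str.lower f) =
        pvPRIORITY.findIdx? (fun d => d == PySem.Str.lower f) := by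
      rw [PySem.List.index?_eq_idxOf?]
      rfl
    rw [h0, h1, ← pvFindIdx?_or]
    congr 1

theorem spoonacular_diet_param_eq (flags : List String) :
    spoonacular_diet_param_py flags = spoonacular_diet_param_py_alt flags := by
  have hA : spoonacular_diet_param_py flags =
      pvPRIORITY.find? (fun d => (flags.map (fun f => PySem.Str.lower f)).contains d) := by
    simp only [spoonacular_diet_param_py]
    congr 1
    funext d
    simp [PySem.Set.contains_eq_listContains]
  rw [hA, List.find?_eq_bind_findIdx?_getElem?]
  unfold spoonacular_diet_param_py_alt
  rw [pvFold_eq_findIdx?]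
  cases h : pvPRIORITY.findIdx? (fun d => (flags.map (fun f => PySem.Str.lower f)).contains d) with
  | none => rfl
  | some i => simp

-- ===== VERDICT (by name: the statement is the Claim_ definition above) =====
theorem spoonacular_diet_param_py_spec : Claim_equal_spoonacular_diet_param_py := by
  intro flags _
  unfold Spec_spoonacular_diet_param_py
  exact spoonacular_diet_param_eq flags
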